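-- pv_equiv track=rewrite | github.com/freddiecorleone/crossword_navigation | src/ssp_modeling/simulation/grid_generator.py | _is_single_component
-- ===== SOURCE A (Python) =====
-- from typing import Dict, List, Optional, Tuple, Set, Any, Union
--
-- def _is_single_component(g: List[List[int]]) -> bool:
--     """Check white-cell connectivity."""
--     R, C = len(g), len(g[0])
--     # Find a starting white cell
--     start = None
--     for r in range(R):
--         for c in range(C):
--             if g[r][c] == 0:
--                 start = (r, c)
--                 break
--         if start:
--             break
--     if not start:
--         return False  # all black (reject)
--
--     # BFS
--     q = [start]
--     seen = {start}
--     while q: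
--         r, c = q.pop()
--         for dr, dc in ((1,0),(-1,0),(0,1),(0,-1)):
--             rr, cc = r+dr, c+dc
--             if 0 <= rr < R and 0 <= cc < C and g[rr][cc] == 0 and (rr, cc) not in seen:
--                 seen.add((rr, cc))
--                 q.append((rr, cc))
--
--     # Count total white
--     total_white = sum(1 for r in range(R) for c in range(C) if g[r][c] == 0)
--     return len(seen) == total_white
-- ===== SOURCE B (Python) =====
-- def _is_single_component(g):
--     """Check white-cell connectivity by round-based set saturation (no stack/queue)."""
--     R, C = len(g), len(g[0])
--     whites = [(r, c) for r in range(R) for c in range(C) if g[r][c] == 0]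
--     if not whites:
--         return False
--     reach = {whites[0]}
--     for _ in range(len(whites)):
--         reach = reach | {(r, c) for (r, c) in whites
--                          if (r - 1, c) in reach or (r + 1, c) in reach
--                          or (r, c - 1) in reach or (r, c + 1) in reach}
--     return len(reach) == len(whites)
-- ===== Notes on version B (the rewrite author's own statement) =====
-- stated objective: alternative
-- what changed: Replaces A's explicit-stack DFS flood fill (pop/push with a visited set) by a round-based whole-set saturation: the white-cell list is computed once and the reachable set is expanded for len(whites) rounds by adding every white cell adjacent to it, with no stack/queue or per-cell visit order.
import Mathlib
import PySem

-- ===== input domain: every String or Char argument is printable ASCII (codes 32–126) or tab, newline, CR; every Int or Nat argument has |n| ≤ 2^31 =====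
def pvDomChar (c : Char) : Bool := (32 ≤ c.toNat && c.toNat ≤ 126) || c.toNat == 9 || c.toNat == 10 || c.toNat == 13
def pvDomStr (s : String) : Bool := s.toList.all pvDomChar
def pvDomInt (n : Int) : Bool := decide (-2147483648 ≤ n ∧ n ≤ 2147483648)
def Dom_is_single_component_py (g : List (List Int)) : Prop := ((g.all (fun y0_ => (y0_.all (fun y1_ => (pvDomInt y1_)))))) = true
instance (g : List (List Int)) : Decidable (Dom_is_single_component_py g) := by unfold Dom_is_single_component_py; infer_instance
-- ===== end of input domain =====

-- B replaces A's explicit-stack DFS flood fill by a round-based whole-set saturation over the white-cell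
-- list (no stack/queue, no per-cell visit order); objective: alternative (same result, not faster).

-- ===== PORT A =====
-- g[r][c] == 0 ; under Pre_ every access is in range, so the default is never used
def whiteAt (g : List (List Int)) (r c : Int) : Bool :=
  (PySem.List.pyGetD (PySem.List.pyGetD g r []) c 1) == 0

-- inner 'for c in range(C): if g[r][c]==0: start=(r,c); break'
def findRowA (g : List (List Int)) (r : Int) : List Int → Option (Int × Int)
  | [] => none
  | c :: cs => if whiteAt g r c then some (r, c) else findRowA g r cs

-- outer 'for r in range(R): … ; if start: break'
def findStartA (g : List (List Int)) (C : Int) : List Int → Option (Int × Int)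
  | [] => none
  | r :: rs =>
    match findRowA g r (PySem.List.pyRange 0 C 1) with
    | some p => some p
    | none => findStartA g C rs

-- one pass of the 'for dr, dc in ((1,0),(-1,0),(0,1),(0,-1))' body; state = (seen, stack)
def dfsStepA (g : List (List Int)) (R C : Int) (p : Int × Int)
    (st : PySem.Set (Int × Int) × List (Int × Int)) : PySem.Set (Int × Int) × List (Int × Int) :=
  [((1 : Int), (0 : Int)), (-1, 0), (0, 1), (0, -1)].foldl
    (fun st d =>
      let rr := p.1 + d.1
      let cc := p.2 + d.2
      if (decide (0 ≤ rr) && decide (rr < R) && decide (0 ≤ cc) && decide (cc < C))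
          && whiteAt g rr cc && !(PySem.Set.contains st.1 (rr, cc))
      then (PySem.Set.add st.1 (rr, cc), (rr, cc) :: st.2)
      else st) st

-- 'while q': the stack keeps its TOP at the head; Python's append/pop at the tail is push/pop at the
-- head here, the same LIFO discipline in the same order.  fuel = R*C bounds the number of iterations
-- (proved sufficient below); it is a totality guard, not a change of algorithm.
def dfsA (g : List (List Int)) (R C : Int) : Nat → List (Int × Int) → PySem.Set (Int × Int) → PySem.Set (Int × Int)
  | 0, _, seen => seen
  | _ + 1, [], seen => seen
  | fuel + 1, p :: q, seen =>
    let st := dfsStepA g R C p (seen, q)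
    dfsA g R C fuel st.2 st.1

-- sum(1 for r in range(R) for c in range(C) if g[r][c] == 0)
def totalWhiteA (g : List (List Int)) (R C : Int) : Int :=
  ((PySem.List.pyRange 0 R 1).flatMap (fun r =>
    ((PySem.List.pyRange 0 C 1).filter (fun c => whiteAt g r c)).map (fun _ => (1 : Int)))).sum

-- R = len(g), C = len(g[0]); Python raises IndexError on g = [] (outside Pre_)
def is_single_component_py (g : List (List Int)) : Bool :=
  match findStartA g ((g.headD []).length : Int) (PySem.List.pyRange 0 (g.length : Int) 1) with
  | none => false     -- all black
  | some s =>
    -- len(seen) == total_white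
    PySem.Set.len (dfsA g (g.length : Int) ((g.headD []).length : Int)
        (g.length * (g.headD []).length) [s] (PySem.Set.ofList [s]))
      == totalWhiteA g (g.length : Int) ((g.headD []).length : Int)

-- ===== PORT B =====
-- [(r, c) for r in range(R) for c in range(C) if g[r][c] == 0]
def whitesB (g : List (List Int)) : List (Int × Int) :=
  (PySem.List.pyRange 0 (g.length : Int) 1).flatMap (fun r =>
    ((PySem.List.pyRange 0 ((g.headD []).length : Int) 1).filter (fun c => whiteAt g r c)).map
      (fun c => (r, c)))

-- the four membership tests of B's comprehension
def hasNbB (reach : PySem.Set (Int × Int)) (p : Int × Int) : Bool :=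
  PySem.Set.contains reach (p.1 - 1, p.2) || PySem.Set.contains reach (p.1 + 1, p.2) ||
  PySem.Set.contains reach (p.1, p.2 - 1) || PySem.Set.contains reach (p.1, p.2 + 1)

-- reach = reach | {(r,c) for (r,c) in whites if …}
def expandB (whites : List (Int × Int)) (reach : PySem.Set (Int × Int)) : PySem.Set (Int × Int) :=
  PySem.Set.union reach (PySem.Set.ofList (whites.filter (hasNbB reach)))

def is_single_component_py_alt (g : List (List Int)) : Bool :=
  match whitesB g with
  | [] => false     -- no white cell
  | w :: _ =>
    -- len(reach) == len(whites) after len(whites) saturation rounds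
    PySem.Set.len ((List.range (whitesB g).length).foldl
        (fun S _ => expandB (whitesB g) S) (PySem.Set.ofList [w]))
      == ((whitesB g).length : Int)

-- ===== PRECONDITION & SPEC =====
-- Pre_ excludes exactly the inputs on which the Python A raises IndexError: the empty grid (g[0])
-- and grids where some row is shorter than the first row (the final full-grid white count reads
-- g[r][c] for every c < len(g[0])).  B raises on exactly the same inputs.
def Pre_is_single_component_py (g : List (List Int)) : Prop :=
  g ≠ [] ∧ ∀ row ∈ g, (g.headD []).length ≤ row.length
instance (g : List (List Int)) : Decidable (Pre_is_single_component_py g) := by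
  unfold Pre_is_single_component_py; infer_instance

def pvWitness_is_single_component_py : List (List Int) := [[0, 1], [0, 0]]

def Spec_is_single_component_py (g : List (List Int)) (out : Bool) : Prop :=
  out = is_single_component_py_alt g
instance (g : List (List Int)) (out : Bool) : Decidable (Spec_is_single_component_py g out) := by
  unfold Spec_is_single_component_py; infer_instance

-- ===== CLAIM (what is proved, stated in full; the proofs are below) =====
def Claim_equal_is_single_component_py : Prop := ∀ (g : List (List Int)),
  Dom_is_single_component_py g → Pre_is_single_component_py g →
  Spec_is_single_component_py g (is_single_component_py g)

-- ===== LEMMAS AND PROOFS =====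

-- a cell inside the R×C box
def InB (g : List (List Int)) (p : Int × Int) : Prop :=
  0 ≤ p.1 ∧ p.1 < (g.length : Int) ∧ 0 ≤ p.2 ∧ p.2 < ((g.headD []).length : Int)

-- white cell of the grid
def Wc (g : List (List Int)) (p : Int × Int) : Prop := InB g p ∧ whiteAt g p.1 p.2 = true

-- orthogonal adjacency between white cells
def AdjP (g : List (List Int)) (p q : Int × Int) : Prop :=
  Wc g p ∧ Wc g q ∧ (q.1 - p.1).natAbs + (q.2 - p.2).natAbs = 1

-- reachable-and-white from s
def RW (g : List (List Int)) (s p : Int × Int) : Prop :=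
  Wc g p ∧ Relation.ReflTransGen (AdjP g) s p

theorem mem_whitesB (g : List (List Int)) (p : Int × Int) :
    p ∈ whitesB g ↔ Wc g p := by
  simp only [whitesB, List.mem_flatMap, List.mem_map, List.mem_filter,
    PySem.List.mem_pyRange_one, Wc, InB]
  constructor
  · rintro ⟨r, hr, c, ⟨hc, hw⟩, rfl⟩
    exact ⟨⟨hr.1, hr.2, hc.1, hc.2⟩, hw⟩
  · rintro ⟨⟨h1, h2, h3, h4⟩, hw⟩
    exact ⟨p.1, ⟨h1, h2⟩, p.2, ⟨⟨h3, h4⟩, hw⟩, rfl⟩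

theorem findRowA_eq (g : List (List Int)) (r : Int) (cs : List Int) :
    findRowA g r cs = (((cs.filter (fun c => whiteAt g r c)).map (fun c => (r, c)))).head? := by
  induction cs with
  | nil => rfl
  | cons c cs ih =>
    by_cases h : whiteAt g r c <;> simp [findRowA, h, ih]

theorem findStartA_eq (g : List (List Int)) (C : Int) (rs : List Int) :
    findStartA g C rs = (rs.flatMap (fun r =>
      ((PySem.List.pyRange 0 C 1).filter (fun c => whiteAt g r c)).map (fun c => (r, c)))).head? := by
  induction rs with
  | nil => rfl
  | cons r rs ih =>
    rw [List.flatMap_cons, List.head?_append, ← findRowA_eq, ← ih]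
    cases h : findRowA g r (PySem.List.pyRange 0 C 1) <;> simp [findStartA, h, Option.or]

theorem findStartA_eq_head (g : List (List Int)) :
    findStartA g ((g.headD []).length : Int) (PySem.List.pyRange 0 (g.length : Int) 1)
      = (whitesB g).head? := by
  rw [findStartA_eq]; rfl

theorem sum_map_one_int {α : Type} (l : List α) :
    (l.map (fun _ => (1 : Int))).sum = (l.length : Int) := by
  induction l with
  | nil => simp
  | cons x l ih => simp; omega

theorem totalWhiteA_eq_aux (g : List (List Int)) (C : Int) (rs : List Int) :
    ((rs.flatMap (fun r =>
        ((PySem.List.pyRange 0 C 1).filter (fun c => whiteAt g r c)).map (fun _ => (1 : Int)))).sum)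
      = (((rs.flatMap (fun r =>
        ((PySem.List.pyRange 0 C 1).filter (fun c => whiteAt g r c)).map (fun c => (r, c)))).length : Int)) := by
  induction rs with
  | nil => simp
  | cons r rs ih =>
    rw [List.flatMap_cons, List.flatMap_cons, List.sum_append, List.length_append, ih,
      sum_map_one_int]
    push_cast
    simp

theorem totalWhiteA_eq (g : List (List Int)) :
    totalWhiteA g (g.length : Int) ((g.headD []).length : Int) = ((whitesB g).length : Int) := by
  unfold totalWhiteA whitesB
  exact totalWhiteA_eq_aux g _ _

-- the body of A's direction loop, named for the proofs
def oneStepA (g : List (List Int)) (p : Int × Int)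
    (st : PySem.Set (Int × Int) × List (Int × Int)) (d : Int × Int) :
    PySem.Set (Int × Int) × List (Int × Int) :=
  let rr := p.1 + d.1
  let cc := p.2 + d.2
  if (decide (0 ≤ rr) && decide (rr < (g.length : Int)) && decide (0 ≤ cc) &&
        decide (cc < ((g.headD []).length : Int)))
      && whiteAt g rr cc && !(PySem.Set.contains st.1 (rr, cc))
  then (PySem.Set.add st.1 (rr, cc), (rr, cc) :: st.2)
  else st

theorem dfsStepA_eq (g : List (List Int)) (p : Int × Int)
    (st : PySem.Set (Int × Int) × List (Int × Int)) :
    dfsStepA g (g.length : Int) ((g.headD []).length : Int) p st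
      = [((1 : Int), (0 : Int)), (-1, 0), (0, 1), (0, -1)].foldl (oneStepA g p) st := rfl

theorem condA_iff (g : List (List Int)) (st1 : PySem.Set (Int × Int)) (rr cc : Int) :
    (((decide (0 ≤ rr) && decide (rr < (g.length : Int)) && decide (0 ≤ cc) &&
        decide (cc < ((g.headD []).length : Int)))
      && whiteAt g rr cc && !(PySem.Set.contains st1 (rr, cc))) = true)
      ↔ (Wc g (rr, cc) ∧ (rr, cc) ∉ st1) := by
  simp [Wc, InB, and_assoc]

theorem oneStepA_pos (g : List (List Int)) (p : Int × Int)
    (st : PySem.Set (Int × Int) × List (Int × Int)) (d : Int × Int)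
    (h : Wc g (p.1 + d.1, p.2 + d.2) ∧ (p.1 + d.1, p.2 + d.2) ∉ st.1) :
    oneStepA g p st d = (PySem.Set.add st.1 (p.1 + d.1, p.2 + d.2), (p.1 + d.1, p.2 + d.2) :: st.2) := by
  unfold oneStepA
  rw [if_pos ((condA_iff g st.1 _ _).mpr h)]

theorem oneStepA_neg (g : List (List Int)) (p : Int × Int)
    (st : PySem.Set (Int × Int) × List (Int × Int)) (d : Int × Int)
    (h : ¬ (Wc g (p.1 + d.1, p.2 + d.2) ∧ (p.1 + d.1, p.2 + d.2) ∉ st.1)) :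
    oneStepA g p st d = st := by
  unfold oneStepA
  rw [if_neg (fun hb => h ((condA_iff g st.1 _ _).mp hb))]

-- all the facts about one pass of the direction loop, proved together
theorem foldA_facts (g : List (List Int)) (p : Int × Int) (dirs : List (Int × Int)) :
    ∀ st : PySem.Set (Int × Int) × List (Int × Int),
    (∀ x ∈ st.1, x ∈ (dirs.foldl (oneStepA g p) st).1) ∧
    (∀ x, x ∈ (dirs.foldl (oneStepA g p) st).1 →
        x ∈ st.1 ∨ (∃ d ∈ dirs, x = (p.1 + d.1, p.2 + d.2) ∧ Wc g x)) ∧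
    (∀ d ∈ dirs, Wc g (p.1 + d.1, p.2 + d.2) →
        (p.1 + d.1, p.2 + d.2) ∈ (dirs.foldl (oneStepA g p) st).1) ∧
    (∀ x ∈ st.2, x ∈ (dirs.foldl (oneStepA g p) st).2) ∧
    (∀ x, x ∈ (dirs.foldl (oneStepA g p) st).1 → x ∉ st.1 →
        x ∈ (dirs.foldl (oneStepA g p) st).2) ∧
    (∀ x ∈ (dirs.foldl (oneStepA g p) st).2, x ∈ st.2 ∨ x ∈ (dirs.foldl (oneStepA g p) st).1) ∧
    (st.1.Nodup → (dirs.foldl (oneStepA g p) st).1.Nodup) ∧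
    (st.1.Nodup → st.2.Nodup → (∀ x ∈ st.2, x ∈ st.1) →
        ((dirs.foldl (oneStepA g p) st).2.Nodup ∧
         ∀ x ∈ (dirs.foldl (oneStepA g p) st).2, x ∈ (dirs.foldl (oneStepA g p) st).1)) ∧
    ((dirs.foldl (oneStepA g p) st).1.length + st.2.length
        = st.1.length + (dirs.foldl (oneStepA g p) st).2.length) := by
  induction dirs with
  | nil =>
    intro st
    refine ⟨fun x hx => hx, fun x hx => Or.inl hx, by simp, fun x hx => hx,
      fun x hx hx' => absurd hx hx', fun x hx => Or.inl hx, id, fun h1 h2 h3 => ⟨h2, fun x hx => h3 x hx⟩, rfl⟩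
  | cons d ds ih =>
    intro st
    rw [List.foldl_cons]
    by_cases hc : Wc g (p.1 + d.1, p.2 + d.2) ∧ (p.1 + d.1, p.2 + d.2) ∉ st.1
    · rw [oneStepA_pos g p st d hc]
      set n := (p.1 + d.1, p.2 + d.2) with hn
      set st1 : PySem.Set (Int × Int) × List (Int × Int) := (PySem.Set.add st.1 n, n :: st.2) with hst1
      obtain ⟨a, b, c, dd, f, fb, gg, hh, ii⟩ := ih st1
      have hadd : ∀ y, y ∈ st1.1 ↔ y ∈ st.1 ∨ y = n := fun y => PySem.Set.mem_add st.1 n y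
      refine ⟨?_, ?_, ?_, ?_, ?_, ?_, ?_, ?_, ?_⟩
      · intro x hx; exact a x ((hadd x).mpr (Or.inl hx))
      · intro x hx
        rcases b x hx with hx1 | ⟨d', hd', rfl, hW⟩
        · rcases (hadd x).mp hx1 with h | h
          · exact Or.inl h
          · exact Or.inr ⟨d, List.mem_cons_self .., h, h ▸ hc.1⟩
        · exact Or.inr ⟨d', List.mem_cons_of_mem d hd', rfl, hW⟩
      · intro d' hd' hW
        rcases List.mem_cons.mp hd' with rfl | hd'
        · exact a _ ((hadd _).mpr (Or.inr rfl))
        · exact c d' hd' hW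
      · intro x hx; exact dd x (List.mem_cons_of_mem n hx)
      · intro x hx hxold
        by_cases hx1 : x ∈ st1.1
        · have hxn : x = n := by rcases (hadd x).mp hx1 with h | h; exact absurd h hxold; exact h
          rw [hxn]
          exact dd n (List.mem_cons_self ..)
        · exact f x hx hx1
      · intro x hx
        rcases fb x hx with h | h
        · rcases List.mem_cons.mp h with hxn | h'
          · rw [hxn]
            exact Or.inr (a n ((hadd n).mpr (Or.inr rfl)))
          · exact Or.inl h'
        · exact Or.inr h
      · intro hnd
        exact gg (PySem.Set.nodup_add st.1 n hnd)
      · intro h1 h2 h3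
        refine hh (PySem.Set.nodup_add st.1 n h1) ?_ ?_
        · exact List.nodup_cons.mpr ⟨fun hmem => hc.2 (h3 n hmem), h2⟩
        · intro x hx
          rcases List.mem_cons.mp hx with hxn | hx'
          · rw [hxn]
            exact (hadd n).mpr (Or.inr rfl)
          · exact (hadd x).mpr (Or.inl (h3 x hx'))
      · have hlen1 : st1.1.length = st.1.length + 1 := by
          rw [hst1]
          simp [PySem.Set.add_of_not_mem hc.2]
        have hlen2 : st1.2.length = st.2.length + 1 := rfl
        omega
    · rw [oneStepA_neg g p st d hc]
      obtain ⟨a, b, c, dd, f, fb, gg, hh, ii⟩ := ih st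
      refine ⟨a, ?_, ?_, dd, f, fb, gg, hh, ii⟩
      · intro x hx
        rcases b x hx with h | ⟨d', hd', rfl, hW⟩
        · exact Or.inl h
        · exact Or.inr ⟨d', List.mem_cons_of_mem d hd', rfl, hW⟩
      · intro d' hd' hW
        rcases List.mem_cons.mp hd' with rfl | hd'
        · have : (p.1 + d'.1, p.2 + d'.2) ∈ st.1 := by
            by_contra hmem
            exact hc ⟨hW, hmem⟩
          exact a _ this
        · exact c d' hd' hW

-- the four directions give exactly the unit steps
theorem dirs4_diff (p : Int × Int) :
    ∀ d ∈ [((1 : Int), (0 : Int)), (-1, 0), (0, 1), (0, -1)],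
      ((p.1 + d.1 - p.1).natAbs + (p.2 + d.2 - p.2).natAbs) = 1 := by
  intro d hd
  rcases List.mem_cons.mp hd with rfl | hd
  · simp
  rcases List.mem_cons.mp hd with rfl | hd
  · simp
  rcases List.mem_cons.mp hd with rfl | hd
  · simp
  rcases List.mem_cons.mp hd with rfl | hd
  · simp
  simp at hd

theorem adj_to_dir (p q : Int × Int) (h : (q.1 - p.1).natAbs + (q.2 - p.2).natAbs = 1) :
    ∃ d ∈ [((1 : Int), (0 : Int)), (-1, 0), (0, 1), (0, -1)], q = (p.1 + d.1, p.2 + d.2) := by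
  obtain ⟨a, b⟩ := p
  obtain ⟨c, e⟩ := q
  simp only at h
  simp only [List.mem_cons, Prod.mk.injEq]
  by_cases h1 : c = a + 1 ∧ e = b
  · exact ⟨(1, 0), by simp, by simp [h1.1, h1.2]⟩
  by_cases h2 : c = a - 1 ∧ e = b
  · exact ⟨(-1, 0), by simp, by simp [h2.1, h2.2]; omega⟩
  by_cases h3 : c = a ∧ e = b + 1
  · exact ⟨(0, 1), by simp, by simp [h3.1, h3.2]⟩
  have h4 : c = a ∧ e = b - 1 := by omega
  exact ⟨(0, -1), by simp, by simp [h4.1, h4.2]; omega⟩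

-- queue/seen invariant of A's DFS loop
def InvA (g : List (List Int)) (s : Int × Int) (q : List (Int × Int))
    (seen : PySem.Set (Int × Int)) : Prop :=
  seen.Nodup ∧ q.Nodup ∧ (∀ x ∈ q, x ∈ seen) ∧ (∀ x ∈ seen, RW g s x) ∧
  (∀ x ∈ seen, x ∉ q → ∀ p', AdjP g x p' → p' ∈ seen)

theorem seen_le_U (g : List (List Int)) (s : Int × Int) (seen : PySem.Set (Int × Int))
    (hnd : seen.Nodup) (hRW : ∀ x ∈ seen, RW g s x) :
    seen.length ≤ (whitesB g).length :=
  (List.subperm_of_subset hnd (fun x hx => (mem_whitesB g x).mpr (hRW x hx).1)).length_le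

theorem dfsA_run (g : List (List Int)) (s : Int × Int) :
    ∀ (fuel : Nat) (q : List (Int × Int)) (seen : PySem.Set (Int × Int)),
    InvA g s q seen →
    q.length + ((whitesB g).length - seen.length) ≤ fuel →
    ∃ F, dfsA g (g.length : Int) ((g.headD []).length : Int) fuel q seen = F ∧
      F.Nodup ∧ (∀ p ∈ F, RW g s p) ∧ (∀ p ∈ seen, p ∈ F) ∧
      (∀ p ∈ F, ∀ p', AdjP g p p' → p' ∈ F) := by
  intro fuel
  induction fuel with
  | zero =>
    intro q seen hInv hfuel
    have hq : q = [] := List.eq_nil_of_length_eq_zero (by omega)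
    subst hq
    exact ⟨seen, rfl, hInv.1, hInv.2.2.2.1, fun p hp => hp,
      fun p hp p' hadj => hInv.2.2.2.2 p hp (by simp) p' hadj⟩
  | succ fuel ih =>
    intro q seen hInv hfuel
    match q with
    | [] =>
      exact ⟨seen, rfl, hInv.1, hInv.2.2.2.1, fun p hp => hp,
        fun p hp p' hadj => hInv.2.2.2.2 p hp (by simp) p' hadj⟩
    | p :: rest =>
      obtain ⟨hnd, hqnd, hqseen, hRW, hcl⟩ := hInv
      have hstep : dfsA g (g.length : Int) ((g.headD []).length : Int) (fuel + 1) (p :: rest) seen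
          = dfsA g (g.length : Int) ((g.headD []).length : Int) fuel
              (dfsStepA g (g.length : Int) ((g.headD []).length : Int) p (seen, rest)).2
              (dfsStepA g (g.length : Int) ((g.headD []).length : Int) p (seen, rest)).1 := rfl
      rw [hstep, dfsStepA_eq]
      set st' := [((1 : Int), (0 : Int)), (-1, 0), (0, 1), (0, -1)].foldl (oneStepA g p) (seen, rest) with hst'
      obtain ⟨fa, fbb, fc, fd, ff, ffb, fg, fh, fi⟩ := foldA_facts g p _ (seen, rest)
      have hpseen : p ∈ seen := hqseen p (List.mem_cons_self ..)
      have hRWp : RW g s p := hRW p hpseen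
      have hrestnd : rest.Nodup := (List.nodup_cons.mp hqnd).2
      have hpnotrest : p ∉ rest := (List.nodup_cons.mp hqnd).1
      have hrestseen : ∀ x ∈ rest, x ∈ seen := fun x hx => hqseen x (List.mem_cons_of_mem p hx)
      have hnd' : st'.1.Nodup := fg hnd
      have hq' := fh hnd hrestnd hrestseen
      have hRW' : ∀ x ∈ st'.1, RW g s x := by
        intro x hx
        rcases fbb x hx with h | ⟨d, hd, rfl, hW⟩
        · exact hRW x h
        · exact ⟨hW, hRWp.2.tail ⟨hRWp.1, hW, dirs4_diff p d hd⟩⟩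
      have hInv' : InvA g s st'.2 st'.1 := by
        refine ⟨hnd', hq'.1, hq'.2, hRW', ?_⟩
        intro x hx hnq p' hadj
        by_cases hxseen : x ∈ seen
        · by_cases hxp : x = p
          · subst hxp
            obtain ⟨d, hd, rfl⟩ := adj_to_dir x p' hadj.2.2
            exact fc d hd hadj.2.1
          · have hxrest : x ∉ rest := fun hr => hnq (fd x hr)
            have : x ∉ p :: rest := by
              intro hmem
              rcases List.mem_cons.mp hmem with h | h
              · exact hxp h
              · exact hxrest h
            exact fa p' (hcl x hxseen this p' hadj)
        · exact absurd (ff x hx hxseen) hnq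
      have hseenle : seen.length ≤ st'.1.length :=
        (List.subperm_of_subset hnd (fun x hx => fa x hx)).length_le
      have hUle : st'.1.length ≤ (whitesB g).length := seen_le_U g s st'.1 hnd' hRW'
      have hseenU : seen.length ≤ (whitesB g).length := seen_le_U g s seen hnd hRW
      have fi' : st'.1.length + rest.length = seen.length + st'.2.length := fi
      have hfuel' : st'.2.length + ((whitesB g).length - st'.1.length) ≤ fuel := by
        simp only [List.length_cons] at hfuel
        omega
      obtain ⟨F, hF, h1, h2, h3, h4⟩ := ih st'.2 st'.1 hInv' hfuel'
      exact ⟨F, hF, h1, h2, fun x hx => h3 x (fa x hx), h4⟩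

theorem length_whitesB_le (g : List (List Int)) :
    (whitesB g).length ≤ g.length * (g.headD []).length := by
  unfold whitesB
  have hgen : ∀ (rs : List Int),
      (rs.flatMap (fun r => ((PySem.List.pyRange 0 ((g.headD []).length : Int) 1).filter
        (fun c => whiteAt g r c)).map (fun c => (r, c)))).length ≤ rs.length * (g.headD []).length := by
    intro rs
    induction rs with
    | nil => simp
    | cons r rs ih =>
      rw [List.flatMap_cons, List.length_append]
      have h1 : (((PySem.List.pyRange 0 ((g.headD []).length : Int) 1).filter
          (fun c => whiteAt g r c)).map (fun c => (r, c))).length ≤ (g.headD []).length := by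
        rw [List.length_map]
        calc ((PySem.List.pyRange 0 ((g.headD []).length : Int) 1).filter
            (fun c => whiteAt g r c)).length
            ≤ (PySem.List.pyRange 0 ((g.headD []).length : Int) 1).length := List.length_filter_le _ _
          _ = (g.headD []).length := by rw [PySem.List.length_pyRange_one]; omega
      have := ih
      simp only [List.length_cons]
      calc _ ≤ (g.headD []).length + rs.length * (g.headD []).length := by omega
        _ = (rs.length + 1) * (g.headD []).length := by ring
  have := hgen (PySem.List.pyRange 0 (g.length : Int) 1)
  rwa [PySem.List.length_pyRange_one, show ((g.length : Int) - 0).toNat = g.length by omega] at this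

-- A-side characterization: the DFS visits exactly the white cells reachable from s
theorem dfsA_sound (g : List (List Int)) (s : Int × Int) (hs : Wc g s)
    (_hhead : (whitesB g).head? = some s) :
    ∃ F, dfsA g (g.length : Int) ((g.headD []).length : Int)
        (g.length * (g.headD []).length) [s] (PySem.Set.ofList [s]) = F ∧
      F.Nodup ∧ (∀ p, p ∈ F ↔ RW g s p) := by
  have hsU : s ∈ whitesB g := (mem_whitesB g s).mpr hs
  have h0 : PySem.Set.ofList [s] = [s] := rfl
  have hInv : InvA g s [s] (PySem.Set.ofList [s]) := by
    rw [h0]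
    refine ⟨List.nodup_singleton s, List.nodup_singleton s, fun x hx => hx,
      ?_, ?_⟩
    · intro x hx
      rw [List.mem_singleton.mp hx]
      exact ⟨hs, Relation.ReflTransGen.refl⟩
    · intro x hx hnx
      exact absurd hx hnx
  have hUpos : 1 ≤ (whitesB g).length := List.length_pos_of_mem hsU
  have hfuel : [s].length + ((whitesB g).length - (PySem.Set.ofList [s]).length)
      ≤ g.length * (g.headD []).length := by
    rw [h0]
    have := length_whitesB_le g
    simp only [List.length_singleton]
    omega
  obtain ⟨F, hF, h1, h2, h3, h4⟩ := dfsA_run g s _ [s] (PySem.Set.ofList [s]) hInv hfuel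
  refine ⟨F, hF, h1, fun p => ⟨h2 p, ?_⟩⟩
  rintro ⟨-, hpath⟩
  have hsF : s ∈ F := h3 s (by rw [h0]; exact List.mem_singleton.mpr rfl)
  induction hpath with
  | refl => exact hsF
  | @tail b c hab hbc ihp => exact h4 b ihp c hbc

-- the iterates of B's saturation loop
def itB (g : List (List Int)) (s : Int × Int) : Nat → PySem.Set (Int × Int)
  | 0 => PySem.Set.ofList [s]
  | n + 1 => expandB (whitesB g) (itB g s n)

theorem foldl_range_itB (g : List (List Int)) (s : Int × Int) (n : Nat) :
    (List.range n).foldl (fun S _ => expandB (whitesB g) S) (PySem.Set.ofList [s]) = itB g s n := by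
  induction n with
  | zero => rfl
  | succ n ih => rw [List.range_succ, List.foldl_append, ih]; rfl

theorem mem_expandB (U : List (Int × Int)) (S : PySem.Set (Int × Int)) (x : Int × Int) :
    x ∈ expandB U S ↔ x ∈ S ∨ (x ∈ U ∧ hasNbB S x = true) := by
  simp [expandB, PySem.Set.mem_union, PySem.Set.mem_ofList, List.mem_filter]

theorem hasNbB_iff (S : PySem.Set (Int × Int)) (x : Int × Int) :
    hasNbB S x = true ↔ ((x.1 - 1, x.2) ∈ S ∨ (x.1 + 1, x.2) ∈ S ∨ (x.1, x.2 - 1) ∈ S ∨ (x.1, x.2 + 1) ∈ S) := by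
  simp [hasNbB, Bool.or_eq_true, or_assoc]

theorem hasNbB_congr (S T : PySem.Set (Int × Int)) (h : ∀ y, y ∈ S ↔ y ∈ T) (x : Int × Int) :
    hasNbB S x = hasNbB T x := by
  simp [hasNbB, h]

-- a unit step in the four directions, as a case split
theorem adj_cases (p q : Int × Int) (h : (q.1 - p.1).natAbs + (q.2 - p.2).natAbs = 1) :
    p = (q.1 - 1, q.2) ∨ p = (q.1 + 1, q.2) ∨ p = (q.1, q.2 - 1) ∨ p = (q.1, q.2 + 1) := by
  obtain ⟨a, b⟩ := p
  obtain ⟨c, d⟩ := q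
  simp only [Prod.mk.injEq]
  simp only at h
  omega

theorem nodup_itB (g : List (List Int)) (s : Int × Int) (n : Nat) : (itB g s n).Nodup := by
  induction n with
  | zero => exact PySem.Set.nodup_ofList _
  | succ n ih => exact PySem.Set.nodup_union _ _ ih

theorem mono_itB (g : List (List Int)) (s : Int × Int) (n : Nat) (x : Int × Int)
    (hx : x ∈ itB g s n) : x ∈ itB g s (n + 1) :=
  (mem_expandB _ _ x).mpr (Or.inl hx)

theorem mem_itB_zero (g : List (List Int)) (s x : Int × Int) :
    x ∈ itB g s 0 ↔ x = s := by
  simp [itB, PySem.Set.mem_ofList]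

theorem sound_itB (g : List (List Int)) (s : Int × Int) (hs : s ∈ whitesB g) (n : Nat)
    (x : Int × Int) (hx : x ∈ itB g s n) : RW g s x := by
  induction n generalizing x with
  | zero =>
    rw [mem_itB_zero] at hx
    subst hx
    exact ⟨(mem_whitesB g x).mp hs, Relation.ReflTransGen.refl⟩
  | succ n ih =>
    rcases (mem_expandB _ _ x).mp hx with h | ⟨hxU, hnb⟩
    · exact ih x h
    · have hWx : Wc g x := (mem_whitesB g x).mp hxU
      have : ∃ n', n' ∈ itB g s n ∧ (x.1 - n'.1).natAbs + (x.2 - n'.2).natAbs = 1 := by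
        rcases (hasNbB_iff _ x).mp hnb with h | h | h | h
        · exact ⟨_, h, by simp⟩
        · exact ⟨_, h, by simp⟩
        · exact ⟨_, h, by simp⟩
        · exact ⟨_, h, by simp⟩
      obtain ⟨n', hn', hd⟩ := this
      have hRWn : RW g s n' := ih n' hn'
      exact ⟨hWx, hRWn.2.tail ⟨hRWn.1, hWx, hd⟩⟩

theorem itB_subset_U (g : List (List Int)) (s : Int × Int) (hs : s ∈ whitesB g) (n : Nat) :
    ∀ x ∈ itB g s n, x ∈ whitesB g := by
  intro x hx
  exact (mem_whitesB g x).mpr (sound_itB g s hs n x hx).1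

theorem length_itB_le (g : List (List Int)) (s : Int × Int) (hs : s ∈ whitesB g) (n : Nat) :
    (itB g s n).length ≤ (whitesB g).length :=
  (List.subperm_of_subset (nodup_itB g s n) (itB_subset_U g s hs n)).length_le

theorem itB_grow (g : List (List Int)) (s : Int × Int) (n : Nat)
    (h : ∀ j < n, ¬ (∀ x, x ∈ itB g s j ↔ x ∈ itB g s (j + 1))) :
    n + 1 ≤ (itB g s n).length := by
  induction n with
  | zero =>
    have h0 : itB g s 0 = [s] := rfl
    simp [h0]
  | succ n ih =>
    have h1 : n + 1 ≤ (itB g s n).length := ih (fun j hj => h j (Nat.lt_succ_of_lt hj))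
    have h2 := h n (Nat.lt_succ_self n)
    have : ∃ x, x ∈ itB g s (n + 1) ∧ x ∉ itB g s n := by
      by_contra hc
      push_neg at hc
      exact h2 (fun x => ⟨mono_itB g s n x, hc x⟩)
    obtain ⟨x, hx1, hx0⟩ := this
    have hsub : (itB g s n ++ [x]) ⊆ itB g s (n + 1) := by
      intro y hy
      rcases List.mem_append.mp hy with hy | hy
      · exact mono_itB g s n y hy
      · rw [List.mem_singleton.mp hy]; exact hx1
    have hnd : (itB g s n ++ [x]).Nodup := by
      rw [List.nodup_append]
      exact ⟨nodup_itB g s n, List.nodup_singleton x, by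
        intro a ha b hb
        rw [List.mem_singleton.mp hb] at *
        intro hEq; exact hx0 (hEq ▸ ha)⟩
    have := (List.subperm_of_subset hnd hsub).length_le
    simp only [List.length_append, List.length_singleton] at this
    omega

theorem itB_stab (g : List (List Int)) (s : Int × Int) (j : Nat)
    (h : ∀ x, x ∈ itB g s j ↔ x ∈ itB g s (j + 1)) :
    ∀ k, ∀ x, x ∈ itB g s (j + k) ↔ x ∈ itB g s j := by
  intro k
  induction k with
  | zero => simp
  | succ k ih =>
    intro x
    have hcong : ∀ y, y ∈ expandB (whitesB g) (itB g s (j + k)) ↔ y ∈ expandB (whitesB g) (itB g s j) := by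
      intro y
      rw [mem_expandB, mem_expandB, hasNbB_congr _ _ ih y]
      constructor
      · rintro (hy | ⟨h1, h2⟩)
        · exact Or.inl ((ih y).mp hy)
        · exact Or.inr ⟨h1, h2⟩
      · rintro (hy | ⟨h1, h2⟩)
        · exact Or.inl ((ih y).mpr hy)
        · exact Or.inr ⟨h1, h2⟩
    have : x ∈ itB g s (j + k + 1) ↔ x ∈ itB g s (j + 1) := hcong x
    rw [show j + (k + 1) = j + k + 1 from rfl, this]
    exact h x |>.symm

theorem itB_fix (g : List (List Int)) (s : Int × Int) (hs : s ∈ whitesB g) :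
    ∀ x, x ∈ itB g s ((whitesB g).length) ↔ x ∈ expandB (whitesB g) (itB g s ((whitesB g).length)) := by
  set N := (whitesB g).length with hN
  have hex : ∃ j, j < N ∧ (∀ x, x ∈ itB g s j ↔ x ∈ itB g s (j + 1)) := by
    by_contra hc
    have hgrow := itB_grow g s N (fun j hj hiff => hc ⟨j, hj, hiff⟩)
    have hle := length_itB_le g s hs N
    omega
  obtain ⟨j, hjN, hstab⟩ := hex
  have hNj : ∀ x, x ∈ itB g s N ↔ x ∈ itB g s j := by
    have := itB_stab g s j hstab (N - j)
    rwa [Nat.add_sub_cancel' (Nat.le_of_lt hjN)] at this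
  intro x
  have hcong : ∀ y, y ∈ expandB (whitesB g) (itB g s N) ↔ y ∈ expandB (whitesB g) (itB g s j) := by
    intro y
    rw [mem_expandB, mem_expandB, hasNbB_congr _ _ hNj y]
    constructor
    · rintro (hy | ⟨h1, h2⟩)
      · exact Or.inl ((hNj y).mp hy)
      · exact Or.inr ⟨h1, h2⟩
    · rintro (hy | ⟨h1, h2⟩)
      · exact Or.inl ((hNj y).mpr hy)
      · exact Or.inr ⟨h1, h2⟩
  rw [hcong x]
  have : x ∈ expandB (whitesB g) (itB g s j) ↔ x ∈ itB g s (j + 1) := Iff.rfl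
  rw [this, ← hstab x, hNj x]

theorem complete_itB (g : List (List Int)) (s : Int × Int) (hs : s ∈ whitesB g)
    (p : Int × Int) (hp : Relation.ReflTransGen (AdjP g) s p) :
    p ∈ itB g s ((whitesB g).length) := by
  induction hp with
  | refl =>
    have : s ∈ itB g s 0 := (mem_itB_zero g s s).mpr rfl
    -- push s through all iterations
    have hmono : ∀ n, s ∈ itB g s n := by
      intro n
      induction n with
      | zero => exact this
      | succ n ih => exact mono_itB g s n s ih
    exact hmono _
  | @tail b c hab hbc ih =>
    have hWc : Wc g c := hbc.2.1
    have hcU : c ∈ whitesB g := (mem_whitesB g c).mpr hWc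
    have hnb : hasNbB (itB g s ((whitesB g).length)) c = true := by
      rw [hasNbB_iff]
      rcases adj_cases b c hbc.2.2 with h | h | h | h <;>
        [exact Or.inl (h ▸ ih); exact Or.inr (Or.inl (h ▸ ih));
         exact Or.inr (Or.inr (Or.inl (h ▸ ih))); exact Or.inr (Or.inr (Or.inr (h ▸ ih)))]
    exact (itB_fix g s hs c).mpr ((mem_expandB _ _ c).mpr (Or.inr ⟨hcU, hnb⟩))

-- B-side characterization: the saturation computes exactly the reachable white cells
theorem satB_sound (g : List (List Int)) (s : Int × Int) (ws : List (Int × Int))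
    (hw : whitesB g = s :: ws) :
    ∃ F, (List.range (whitesB g).length).foldl (fun S _ => expandB (whitesB g) S)
        (PySem.Set.ofList [s]) = F ∧
      F.Nodup ∧ (∀ p, p ∈ F ↔ RW g s p) := by
  have hs : s ∈ whitesB g := by rw [hw]; exact List.mem_cons_self ..
  refine ⟨itB g s ((whitesB g).length), foldl_range_itB g s _, nodup_itB g s _, fun p => ?_⟩
  constructor
  · exact sound_itB g s hs _ p
  · rintro ⟨_, hreach⟩
    exact complete_itB g s hs p hreach

-- ===== VERDICT (by name: the statement is the Claim_ definition above) =====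
theorem is_single_component_py_spec : Claim_equal_is_single_component_py := by
  intro g _ _
  unfold Spec_is_single_component_py
  cases hw : whitesB g with
  | nil =>
    unfold is_single_component_py is_single_component_py_alt
    rw [findStartA_eq_head, hw]
    rfl
  | cons s ws =>
    have hd : (whitesB g).head? = some s := by rw [hw]; rfl
    have hsU : s ∈ whitesB g := by rw [hw]; exact List.mem_cons_self ..
    have hWs : Wc g s := (mem_whitesB g s).mp hsU
    obtain ⟨FA, hFA, hndA, hmemA⟩ := dfsA_sound g s hWs hd
    obtain ⟨FB, hFB, hndB, hmemB⟩ := satB_sound g s ws hw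
    have hlen : FA.length = FB.length :=
      ((List.perm_ext_iff_of_nodup hndA hndB).mpr
        (fun p => (hmemA p).trans (hmemB p).symm)).length_eq
    unfold is_single_component_py is_single_component_py_alt
    rw [findStartA_eq_head, hd, totalWhiteA_eq]
    rw [hw] at hFB ⊢
    show (PySem.Set.len (dfsA g (g.length : Int) ((g.headD []).length : Int)
        (g.length * (g.headD []).length) [s] (PySem.Set.ofList [s])) == ((s :: ws).length : Int))
      = (PySem.Set.len ((List.range (s :: ws).length).foldl
          (fun S _ => expandB (s :: ws) S) (PySem.Set.ofList [s])) == ((s :: ws).length : Int))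
    rw [hFA, hFB]
    have h1 : PySem.Set.len FA = (FA.length : Int) := rfl
    have h2 : PySem.Set.len FB = (FB.length : Int) := rfl
    rw [h1, h2, hlen]
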